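-- pv_equiv track=rewrite | github.com/686f6c61/Domain-Finder | domain_finder.py | generate_domains
-- ===== SOURCE A (Python) =====
-- import string
--
-- def generate_domains(length=3, tld=".com"):
--     """
--     Generate all possible letter combinations for a given TLD.
--
--     Args:
--         length (int): Domain length (3 or 4 letters)
--         tld (str): Top-level domain (e.g., '.com')
--
--     Returns:
--         list: All possible domain combinations
--
--     Complexity:
--         O(26^length) - Exponential growth with domain length
--         - 3 letters: 26^3 = 17,576 combinations
--         - 4 letters: 26^4 = 456,976 combinations
--     """
--     letters = string.ascii_lowercase
--     domains = []
--
--     if length == 3: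
--         # Triple nested loop for 3-letter combinations
--         for a in letters:
--             for b in letters:
--                 for c in letters:
--                     domains.append(f"{a}{b}{c}{tld}")
--     elif length == 4:
--         # Quadruple nested loop for 4-letter combinations
--         for a in letters:
--             for b in letters:
--                 for c in letters:
--                     for d in letters:
--                         domains.append(f"{a}{b}{c}{d}{tld}")
--
--     return domains
-- ===== SOURCE B (Python) =====
-- import string
--
-- def generate_domains(length=3, tld=".com"):
--     if length not in (3, 4):
--         return []
--     letters = string.ascii_lowercase
--     prefixes = [""]
--     for _ in range(length):
--         prefixes = [p + ch for p in prefixes for ch in letters]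
--     return [p + tld for p in prefixes]
-- ===== Notes on version B (the rewrite author's own statement) =====
-- stated objective: alternative
-- what changed: Replaced the two hard-coded 3- and 4-deep nested-loop ladders by a single guard plus one length-driven prefix-expansion loop (repeatedly extending every prefix by every letter), then suffixing the TLD.
import Mathlib
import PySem

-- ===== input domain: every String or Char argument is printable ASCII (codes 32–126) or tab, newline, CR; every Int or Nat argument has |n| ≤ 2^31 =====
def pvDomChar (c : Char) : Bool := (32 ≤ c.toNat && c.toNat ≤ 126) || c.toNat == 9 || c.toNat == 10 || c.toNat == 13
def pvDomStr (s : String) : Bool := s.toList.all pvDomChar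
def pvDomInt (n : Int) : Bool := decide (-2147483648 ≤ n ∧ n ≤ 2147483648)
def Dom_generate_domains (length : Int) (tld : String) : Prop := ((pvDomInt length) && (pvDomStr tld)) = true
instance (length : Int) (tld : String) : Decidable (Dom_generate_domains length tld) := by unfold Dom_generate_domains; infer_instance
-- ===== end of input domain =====

-- B replaces A's hard-coded 3- and 4-deep nested-loop ladders by a guard plus one
-- length-driven prefix-expansion loop; same output, same order (objective: alternative).


-- ===== PORT A =====
def pvLetters : List Char := "abcdefghijklmnopqrstuvwxyz".toList

-- literal transliteration of A: two nested-loop ladders appending f"{a}{b}{c}{tld}" / f"{a}{b}{c}{d}{tld}"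
def generate_domains (length : Int) (tld : String) : List String :=
  let letters := pvLetters
  let domains : List String := []
  if length == 3 then
    letters.foldl (fun dom a =>
      letters.foldl (fun dom b =>
        letters.foldl (fun dom c =>
          dom ++ [String.ofList ([a, b, c] ++ tld.toList)]) dom) dom) domains
  else if length == 4 then
    letters.foldl (fun dom a =>
      letters.foldl (fun dom b =>
        letters.foldl (fun dom c =>
          letters.foldl (fun dom d =>
            dom ++ [String.ofList ([a, b, c, d] ++ tld.toList)]) dom) dom) dom) domains
  else
    domains

-- ===== PORT B =====
-- literal transliteration of B: guard, then `length` rounds of prefix expansion, then suffix the tld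
def generate_domains_alt (length : Int) (tld : String) : List String :=
  if length == 3 || length == 4 then
    let letters := pvLetters
    let prefixes : List (List Char) :=
      (PySem.List.pyRange 0 length 1).foldl
        (fun ps _ => ps.flatMap (fun p => letters.map (fun ch => p ++ [ch]))) [[]]
    prefixes.map (fun p => String.ofList (p ++ tld.toList))
  else
    []

-- ===== PRECONDITION & SPEC =====
def Spec_generate_domains (length : Int) (tld : String) (out : List String) : Prop := out = generate_domains_alt length tld
instance (length : Int) (tld : String) (out : List String) : Decidable (Spec_generate_domains length tld out) := by unfold Spec_generate_domains; infer_instance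

-- ===== CLAIM (what is proved, stated in full; the proofs are below) =====
def Claim_equal_generate_domains : Prop := ∀ (length : Int) (tld : String), Dom_generate_domains length tld → Spec_generate_domains length tld (generate_domains length tld)

-- ===== LEMMAS AND PROOFS =====

theorem ofList_append_str (l : List Char) (s : String) :
    String.ofList l ++ s = String.ofList (l ++ s.toList) := by
  apply String.toList_injective
  simp


theorem generate_domains_eq_three (tld : String) :
    generate_domains 3 tld = generate_domains_alt 3 tld := by
  simp only [generate_domains, generate_domains_alt,
    PySem.List.foldl_append_singleton_eq_map, PySem.List.foldl_append_eq_flatMap]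
  norm_num
  have hr : PySem.List.pyRange 0 3 1 = [0, 1, 2] := by decide
  rw [hr]
  simp only [List.foldl, List.map_flatMap, List.flatMap_map, List.flatMap_assoc, List.map_map,
    Function.comp_def, List.flatMap_cons, List.flatMap_nil, List.append_nil, List.nil_append,
    List.cons_append, ofList_append_str]

theorem generate_domains_eq_four (tld : String) :
    generate_domains 4 tld = generate_domains_alt 4 tld := by
  simp only [generate_domains, generate_domains_alt,
    PySem.List.foldl_append_singleton_eq_map, PySem.List.foldl_append_eq_flatMap]
  norm_num
  have hr : PySem.List.pyRange 0 4 1 = [0, 1, 2, 3] := by decide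
  rw [hr]
  simp only [List.foldl, List.map_flatMap, List.flatMap_map, List.flatMap_assoc, List.map_map,
    Function.comp_def, List.flatMap_cons, List.flatMap_nil, List.append_nil, List.nil_append,
    List.cons_append, ofList_append_str]

-- ===== VERDICT (by name: the statement is the Claim_ definition above) =====
theorem generate_domains_spec : Claim_equal_generate_domains := by
  intro length tld _
  unfold Spec_generate_domains
  by_cases h3 : length = 3
  · subst h3; exact generate_domains_eq_three tld
  · by_cases h4 : length = 4
    · subst h4; exact generate_domains_eq_four tld
    · simp [generate_domains, generate_domains_alt, h3, h4]
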